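-- pv_equiv track=rewrite | github.com/jbdrvl/cryptography | Vigenere-Ceasar/utils.py | repetitions
-- ===== SOURCE A (Python) =====
-- def repetitions(txt,mini=2,maxi=4,la=5,lb=24):
--     '''
--     repetitions(txt) returns the list of distances between different identical substrings and the number of times these are found in *txt*
--         type(txt) = string
--         script only studies substrings that are of length l such that: *mini* <= l < *maxi*
--             type(mini) = type(maxi) = integer
--         script only keeps the ditances between two identical substrings that are between *la* and *lb*
--             type(la) = type(lb) = interger
--     '''
--     rep2=[]
--     for i in range(mini,maxi):
--         l=[i] # lst of substrings
--         l += [txt[j:j+i] for j in range(len(txt)-i)]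
--         distances=[]
--         for j in range(1,len(l)):
--             indx=j
--             dist=0
--             while indx!=len(l):
--                 found=txt.find(l[j],indx)
--                 if found!=-1:
--                     dist=found-j+1
--                     rep2.append(dist)
--                     indx=found
--                 indx+=1
--     rep=[]
--     for i in range(la,lb+1):
--         n=0
--         for j in rep2:
--             if j%i==0: n+=1
--         rep.append((i,n))
--     return rep
-- ===== SOURCE B (Python) =====
-- def repetitions(txt, mini=2, maxi=4, la=5, lb=24):
--     n = len(txt)
--     rep2 = []
--     for i in range(mini, maxi):
--         # index every substring of length i by its start positions (one pass)
--         occ = {}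
--         for p in range(max(n - i + 1, 0)):
--             occ.setdefault(txt[p:p+i], []).append(p)
--         # emit the distance from each start p to every later equal occurrence
--         for p in range(n - i):
--             for q in occ[txt[p:p+i]]:
--                 if q > p:
--                     rep2.append(q - p)
--     # count divisibility per modulus over the multiset of distances
--     counts = {}
--     for d in rep2:
--         counts[d] = counts.get(d, 0) + 1
--     return [(m, sum(c for d, c in counts.items() if d % m == 0)) for m in range(la, lb + 1)]
-- ===== Notes on version B (the rewrite author's own statement) =====
-- stated objective: alternative
-- what changed: A re-scans the text with txt.find from every start index (a while-loop of find calls per position, per substring length) and then rescans the whole distance list for each modulus; B builds, once per length, a dict mapping each substring to its list of start positions and emits the distance from each position to every later equal occurrence directly, then counts divisibility per modulus from a counter of distances.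
-- outside the precondition, e.g. on repetitions('ab', -1, 0, 1, 2): A returns [(1, 1), (2, 0)], B returns [(1, 3), (2, 1)]
import Mathlib
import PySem

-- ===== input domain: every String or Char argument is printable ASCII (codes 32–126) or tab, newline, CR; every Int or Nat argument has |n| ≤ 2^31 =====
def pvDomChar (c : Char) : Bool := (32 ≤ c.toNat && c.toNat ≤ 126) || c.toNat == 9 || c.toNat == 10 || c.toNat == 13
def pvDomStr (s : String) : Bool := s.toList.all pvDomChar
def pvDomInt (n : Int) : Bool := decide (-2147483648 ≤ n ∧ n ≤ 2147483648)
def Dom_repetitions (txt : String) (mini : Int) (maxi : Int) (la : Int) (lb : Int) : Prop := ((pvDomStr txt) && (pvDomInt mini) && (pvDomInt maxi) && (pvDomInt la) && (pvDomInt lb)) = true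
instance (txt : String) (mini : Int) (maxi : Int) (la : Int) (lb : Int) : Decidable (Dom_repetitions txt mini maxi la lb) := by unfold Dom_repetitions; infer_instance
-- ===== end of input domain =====

-- B replaces A's repeated txt.find scans by a dict indexing every substring's start
-- positions once, emitting pairwise distances directly, and counts divisibility from a
-- counter of distances instead of rescanning the distance list per modulus
-- (objective: alternative).

-- ===== PORT A =====
-- A's inner while loop for one j: while indx != len(l): found = txt.find(l[j], indx);
-- if found != -1: rep2.append(found - j + 1); indx = found;  then indx += 1.
-- fuel = (L - indx).toNat at the call site: Python's indx grows by ≥ 1 per iteration,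
-- so the fuel covers every iteration Python performs.
def pvFindLoopA (txt sub : String) (j L : Int) : Int → List Int → Nat → List Int
  | _, acc, 0 => acc
  | indx, acc, fuel + 1 =>
    if indx = L then acc
    else
      let found := PySem.Str.findFrom txt sub indx
      if found ≠ -1 then
        pvFindLoopA txt sub j L (found + 1) (acc ++ [found - j + 1]) fuel
      else
        pvFindLoopA txt sub j L (indx + 1) acc fuel

-- Python's l = [i] + [txt[j:j+i] …] is heterogeneous (l[0] = i is an int, only ever
-- used through len(l)); it is ported as the substring list 'subs' plus L = len(subs)+1,
-- with l[j] = subs[j-1].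
def repetitions (txt : String) (mini : Int) (maxi : Int) (la : Int) (lb : Int) : List (Int × Int) :=
  let rep2 : List Int :=
    (PySem.List.pyRange mini maxi).foldl (fun rep2 i =>
      let subs : List String :=
        (PySem.List.pyRange 0 (PySem.Str.len txt - i)).map
          (fun j => PySem.Str.slice txt (some j) (some (j + i)))
      let L : Int := (subs.length : Int) + 1
      (PySem.List.pyRange 1 L).foldl (fun rep2 j =>
        pvFindLoopA txt (PySem.List.pyGetD subs (j - 1) "") j L j rep2 (L - j).toNat) rep2) []
  (PySem.List.pyRange la (lb + 1)).foldl (fun rep m =>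
    let n := rep2.foldl (fun nn d => if PySem.Int.mod d m = 0 then nn + 1 else nn) (0 : Int)
    rep ++ [(m, n)]) []

-- ===== PORT B =====
-- occ.setdefault(key, []).append(p) is Dict.modify key [] (· ++ [p]).
def repetitions_alt (txt : String) (mini : Int) (maxi : Int) (la : Int) (lb : Int) : List (Int × Int) :=
  let n := PySem.Str.len txt
  let rep2 : List Int :=
    (PySem.List.pyRange mini maxi).foldl (fun rep2 i =>
      let occ : PySem.Dict String (List Int) :=
        (PySem.List.pyRange 0 (max (n - i + 1) 0)).foldl
          (fun occ p => occ.modify (PySem.Str.slice txt (some p) (some (p + i))) [] (· ++ [p]))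
          PySem.Dict.empty
      (PySem.List.pyRange 0 (n - i)).foldl (fun rep2 p =>
        (occ.getD (PySem.Str.slice txt (some p) (some (p + i))) []).foldl
          (fun rep2 q => if q > p then rep2 ++ [q - p] else rep2) rep2) rep2) []
  let counts : PySem.Dict Int Int :=
    rep2.foldl (fun counts d => counts.insert d (counts.getD d 0 + 1)) PySem.Dict.empty
  (PySem.List.pyRange la (lb + 1)).map (fun m =>
    (m, ((counts.items.filter (fun pr => PySem.Int.mod pr.1 m = 0)).map (fun pr => pr.2)).sum))

-- ===== PRECONDITION & SPEC =====
-- Pre_ excludes (a) mini < 0 with mini < maxi (some studied length is negative): such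
-- lengths are outside the task's natural domain (Python's txt[j:j+i] then wraps around to
-- a slice ending at len+i, an accident of negative slice bounds), and (b) a modulus range with la ≤ 0 ≤ lb when the text has a
-- repeated substring of a studied length: exactly there A divides by zero (ZeroDivisionError).
def Pre_repetitions (txt : String) (mini : Int) (maxi : Int) (la : Int) (lb : Int) : Prop :=
  (0 ≤ mini ∨ maxi ≤ mini) ∧ (0 < la ∨ lb < 0 ∨
    ∀ i ∈ PySem.List.pyRange mini (min maxi (PySem.Str.len txt)),
      ∀ q ∈ PySem.List.pyRange 1 (PySem.Str.len txt - i + 1),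
      ∀ p ∈ PySem.List.pyRange 0 q,
        PySem.Str.slice txt (some p) (some (p + i)) ≠ PySem.Str.slice txt (some q) (some (q + i)))
instance (txt : String) (mini : Int) (maxi : Int) (la : Int) (lb : Int) : Decidable (Pre_repetitions txt mini maxi la lb) := by unfold Pre_repetitions; infer_instance

def pvWitness_repetitions : String × Int × Int × Int × Int := ("abcabc ab", 2, 4, 5, 24)

def Spec_repetitions (txt : String) (mini : Int) (maxi : Int) (la : Int) (lb : Int) (out : List (Int × Int)) : Prop := out = repetitions_alt txt mini maxi la lb
instance (txt : String) (mini : Int) (maxi : Int) (la : Int) (lb : Int) (out : List (Int × Int)) : Decidable (Spec_repetitions txt mini maxi la lb out) := by unfold Spec_repetitions; infer_instance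

-- ===== CLAIM (what is proved, stated in full; the proofs are below) =====
def Claim_equal_repetitions : Prop := ∀ (txt : String) (mini : Int) (maxi : Int) (la : Int) (lb : Int), Dom_repetitions txt mini maxi la lb → Pre_repetitions txt mini maxi la lb → Spec_repetitions txt mini maxi la lb (repetitions txt mini maxi la lb)

-- ===== LEMMAS AND PROOFS =====
lemma pv_sliceEq_iff (cs : List Char) (i p q : Int) (hi : 0 ≤ i) (hp : 0 ≤ p)
    (hpi : p + i ≤ (cs.length : Int)) (hq : 0 ≤ q) :
    PySem.List.slice cs (some q) (some (q + i)) = PySem.List.slice cs (some p) (some (p + i)) ↔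
      PySem.List.slice cs (some p) (some (p + i)) <+: cs.drop q.toNat := by
  rw [PySem.List.slice_toNat cs hq (by omega), PySem.List.slice_toNat cs hp (by omega)]
  have hqi : (q + i).toNat - q.toNat = i.toNat := by omega
  have hpi' : (p + i).toNat - p.toNat = i.toNat := by omega
  rw [hqi, hpi']
  have hlen : ((cs.drop p.toNat).take i.toNat).length = i.toNat := by
    simp [List.length_take, List.length_drop]
    omega
  rw [List.prefix_iff_eq_take, hlen]
  constructor
  · intro h; exact h.symm
  · intro h; exact h.symm

lemma pv_findLoopA_eq(txt sub : String) (j L : Int)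
    (hL : L = (txt.toList.length : Int) - (sub.toList.length : Int) + 1) :
    ∀ (fuel : Nat) (indx : Int) (acc : List Int), 0 ≤ indx → indx ≤ L → (L - indx).toNat ≤ fuel →
    pvFindLoopA txt sub j L indx acc fuel =
      acc ++ ((PySem.List.pyRange indx L).filter
        (fun q => decide (sub.toList <+: txt.toList.drop q.toNat))).map (fun q => q - j + 1) := by
  intro fuel
  induction fuel with
  | zero =>
    intro indx acc h0 hle hf
    have hEq : indx = L := by omega
    subst hEq
    simp [pvFindLoopA, PySem.List.pyRange_one_eq_nil (le_refl indx)]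
  | succ fuel ih =>
    intro indx acc h0 hle hf
    by_cases hEnd : indx = L
    · subst hEnd
      simp [pvFindLoopA, PySem.List.pyRange_one_eq_nil (le_refl indx)]
    · have hlt : indx < L := lt_of_le_of_ne hle hEnd
      have hkc : ((indx.toNat : Nat) : Int) = indx := Int.toNat_of_nonneg h0
      have hkle : indx.toNat ≤ txt.toList.length := by
        have hs : (0:Int) ≤ (sub.toList.length : Int) := by positivity
        omega
      by_cases hF : PySem.Str.findFrom txt sub indx = -1
      · -- no occurrence at or after indx: nothing is ever appended
        have hnone : ¬ sub.toList <:+: txt.toList.drop indx.toNat := by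
          rw [show PySem.Str.findFrom txt sub indx
              = PySem.Chars.findFrom txt.toList sub.toList indx none by simp] at hF
          rw [← hkc] at hF
          exact (PySem.Chars.findFrom_natCast_eq_neg_one_iff txt.toList sub.toList indx.toNat hkle).mp hF
        have hnil : ∀ (a b : Int), indx ≤ a →
            (PySem.List.pyRange a b).filter
              (fun q => decide (sub.toList <+: txt.toList.drop q.toNat)) = [] := by
          intro a b ha
          refine List.filter_eq_nil_iff.mpr ?_
          intro q hq
          simp only [decide_eq_true_eq]
          intro hpre
          rcases PySem.List.mem_pyRange_one.mp hq with ⟨hq1, _⟩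
          apply hnone
          have hdd : txt.toList.drop q.toNat
              = (txt.toList.drop indx.toNat).drop (q.toNat - indx.toNat) := by
            rw [List.drop_drop]
            congr 1
            omega
          rw [hdd] at hpre
          exact hpre.isInfix.trans (List.drop_suffix _ _).isInfix
        have hF' : PySem.Chars.findFrom txt.toList sub.toList indx none = -1 := by
          simpa using hF
        rw [show pvFindLoopA txt sub j L indx acc (fuel + 1)
            = pvFindLoopA txt sub j L (indx + 1) acc fuel by
          simp [pvFindLoopA, hEnd, hF']]
        rw [ih (indx + 1) acc (by omega) (by omega) (by omega)]
        rw [hnil indx L le_rfl, hnil (indx + 1) L (by omega)]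
      · -- first occurrence f ∈ [indx, L)
        set f := PySem.Str.findFrom txt sub indx with hfdef
        have hfe : f = PySem.Chars.findFrom txt.toList sub.toList ((indx.toNat : Nat) : Int) none := by
          rw [hfdef, hkc]; simp
        have hsp := PySem.Chars.findFrom_natCast_spec txt.toList sub.toList indx.toNat hkle
          (by rw [← hfe]; exact hF)
        rw [← hfe] at hsp
        obtain ⟨hk_le, hpre, hmin⟩ := hsp
        rw [hkc] at hk_le
        have hf0 : 0 ≤ f := le_trans h0 hk_le
        have hflen : sub.toList.length ≤ txt.toList.length - f.toNat :=
          le_trans hpre.length_le (by simp)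
        have hfn : f ≤ (txt.toList.length : Int) := by
          rw [hfe, PySem.Chars.findFrom_natCast _ _ _ hkle]
          have hd := PySem.Chars.find_le_length (txt.toList.drop indx.toNat) sub.toList
          simp only [List.length_drop] at hd
          split <;> omega
        have hfL : f < L := by omega
        rw [show pvFindLoopA txt sub j L indx acc (fuel + 1)
            = pvFindLoopA txt sub j L (f + 1) (acc ++ [f - j + 1]) fuel by
          simp only [pvFindLoopA, if_neg hEnd, ← hfdef, if_pos hF]]
        rw [ih (f + 1) (acc ++ [f - j + 1]) (by omega) (by omega) (by omega)]
        rw [PySem.List.pyRange_one_append indx f L hk_le (le_of_lt hfL),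
          PySem.List.pyRange_one_cons hfL]
        rw [List.filter_append]
        have hnil1 : (PySem.List.pyRange indx f).filter
            (fun q => decide (sub.toList <+: txt.toList.drop q.toNat)) = [] := by
          refine List.filter_eq_nil_iff.mpr ?_
          intro q hq
          simp only [decide_eq_true_eq]
          rcases PySem.List.mem_pyRange_one.mp hq with ⟨hq1, hq2⟩
          exact hmin q.toNat (by omega) (by omega)
        rw [hnil1]
        have hPf : (fun q => decide (sub.toList <+: txt.toList.drop q.toNat)) f = true := by
          simp only [decide_eq_true_eq]
          exact hpre
        rw [List.filter_cons]
        simp [hpre, List.append_assoc]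

lemma pv_occ_getD (key : Int → String) (M : Int) (c : String) :
    ((PySem.List.pyRange 0 M).foldl
        (fun occ p => occ.modify (key p) [] (· ++ [p])) PySem.Dict.empty).getD c []
      = (PySem.List.pyRange 0 M).filter (fun q => key q == c) := by
  have h1 : (PySem.List.pyRange 0 M).foldl
        (fun occ p => occ.modify (key p) [] (· ++ [p])) (PySem.Dict.empty (κ := String) (ν := List Int))
      = ((PySem.List.pyRange 0 M).map (fun p => (key p, p))).foldl
          (fun occ pr => occ.modify pr.1 [] (· ++ [pr.2])) PySem.Dict.empty := by
    rw [List.foldl_map]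
  rw [h1, PySem.Dict.getD_foldl_modify_append, List.filter_map, List.map_map]
  simp [Function.comp_def]

-- pointwise: A's contribution for j = 1+k equals B's contribution for p = k
lemma pv_g_eq (txt : String) (i : Int) (hi : 0 ≤ i) (k : Nat)
    (hk : (k : Int) < (txt.toList.length : Int) - i) :
    ((PySem.List.pyRange (1 + (k : Int)) ((txt.toList.length : Int) - i + 1)).filter
        (fun q => decide ((PySem.Str.slice txt (some ((k : Int))) (some ((k : Int) + i))).toList
            <+: txt.toList.drop q.toNat))).map (fun q => q - (1 + (k : Int)) + 1)
    = (((PySem.List.pyRange 0 (max ((txt.toList.length : Int) - i + 1) 0)).filter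
          (fun q => PySem.Str.slice txt (some q) (some (q + i))
              == PySem.Str.slice txt (some ((k : Int))) (some ((k : Int) + i)))).filter
          (fun q => decide (q > (k : Int)))).map (fun q => q - (k : Int)) := by
  set n : Int := (txt.toList.length : Int) with hn
  have hM : max (n - i + 1) 0 = n - i + 1 := by omega
  rw [hM, List.filter_filter]
  rw [PySem.List.pyRange_one_append 0 ((k : Int) + 1) (n - i + 1) (by omega) (by omega)]
  rw [List.filter_append]
  have h1 : (PySem.List.pyRange 0 ((k : Int) + 1)).filter
      (fun q => decide (q > (k : Int)) && (PySem.Str.slice txt (some q) (some (q + i))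
          == PySem.Str.slice txt (some ((k : Int))) (some ((k : Int) + i)))) = [] := by
    refine List.filter_eq_nil_iff.mpr ?_
    intro q hq
    rcases PySem.List.mem_pyRange_one.mp hq with ⟨_, hq2⟩
    simp only [Bool.and_eq_true, decide_eq_true_eq]
    rintro ⟨h, -⟩
    omega
  rw [h1, List.nil_append]
  have h2 : (PySem.List.pyRange ((k : Int) + 1) (n - i + 1)).filter
      (fun q => decide (q > (k : Int)) && (PySem.Str.slice txt (some q) (some (q + i))
          == PySem.Str.slice txt (some ((k : Int))) (some ((k : Int) + i))))
      = (PySem.List.pyRange ((k : Int) + 1) (n - i + 1)).filter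
      (fun q => decide ((PySem.Str.slice txt (some ((k : Int))) (some ((k : Int) + i))).toList
          <+: txt.toList.drop q.toNat)) := by
    refine List.filter_congr ?_
    intro q hq
    rcases PySem.List.mem_pyRange_one.mp hq with ⟨hq1, hq2⟩
    have hgt : decide (q > (k : Int)) = true := by simp; omega
    rw [hgt, Bool.true_and, Bool.beq_eq_decide_eq, decide_eq_decide, ← String.toList_inj]
    simp only [PySem.Str.toList_slice, PySem.Chars.slice_eq_listSlice]
    exact pv_sliceEq_iff txt.toList i (k : Int) q hi (by omega) (by omega) (by omega)
  rw [h2]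
  have h3 : (1 : Int) + (k : Int) = (k : Int) + 1 := by ring
  rw [h3]
  refine List.map_congr_left ?_
  intro a _
  ring

-- the contributionof one substring length i to rep2 is the same in both programs
lemma pv_bodyI_eq (txt : String) (i : Int) (hi : 0 ≤ i) (rep2 : List Int) :
    (PySem.List.pyRange 1
        (((((PySem.List.pyRange 0 (PySem.Str.len txt - i)).map
            (fun j => PySem.Str.slice txt (some j) (some (j + i)))).length : Int) + 1))).foldl
      (fun rep2 j =>
        pvFindLoopA txt
          (PySem.List.pyGetD ((PySem.List.pyRange 0 (PySem.Str.len txt - i)).map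
            (fun j => PySem.Str.slice txt (some j) (some (j + i)))) (j - 1) "") j
          ((((PySem.List.pyRange 0 (PySem.Str.len txt - i)).map
            (fun j => PySem.Str.slice txt (some j) (some (j + i)))).length : Int) + 1) j rep2
          (((((PySem.List.pyRange 0 (PySem.Str.len txt - i)).map
            (fun j => PySem.Str.slice txt (some j) (some (j + i)))).length : Int) + 1) - j).toNat) rep2
    = (PySem.List.pyRange 0 (PySem.Str.len txt - i)).foldl (fun rep2 p =>
        ((((PySem.List.pyRange 0 (max (PySem.Str.len txt - i + 1) 0)).foldl
            (fun occ p => occ.modify (PySem.Str.slice txt (some p) (some (p + i))) [] (· ++ [p]))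
            PySem.Dict.empty)).getD (PySem.Str.slice txt (some p) (some (p + i))) []).foldl
          (fun rep2 q => if q > p then rep2 ++ [q - p] else rep2) rep2) rep2 := by
  simp only [PySem.Str.len_eq]
  set nn : Int := (txt.toList.length : Int) with hnn
  have h0nn : 0 ≤ nn := by positivity
  have hlen : (((PySem.List.pyRange 0 (nn - i)).map
      (fun j => PySem.Str.slice txt (some j) (some (j + i)))).length : Int)
      = ((nn - i).toNat : Int) := by
    simp [PySem.List.length_pyRange_one]
  rw [hlen]
  set L : Int := ((nn - i).toNat : Int) + 1 with hL
  -- A side: canonical form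
  have hA : (PySem.List.pyRange 1 L).foldl
      (fun rep2 j =>
        pvFindLoopA txt
          (PySem.List.pyGetD ((PySem.List.pyRange 0 (nn - i)).map
            (fun j => PySem.Str.slice txt (some j) (some (j + i)))) (j - 1) "") j
          L j rep2 (L - j).toNat) rep2
      = rep2 ++ (PySem.List.pyRange 1 L).flatMap (fun j =>
          ((PySem.List.pyRange j (nn - i + 1)).filter
            (fun q => decide ((PySem.Str.slice txt (some (j - 1)) (some ((j - 1) + i))).toList
                <+: txt.toList.drop q.toNat))).map (fun q => q - j + 1)) := by
    rw [PySem.List.foldl_congr_mem' _ _ (fun acc j =>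
        acc ++ ((PySem.List.pyRange j (nn - i + 1)).filter
          (fun q => decide ((PySem.Str.slice txt (some (j - 1)) (some ((j - 1) + i))).toList
              <+: txt.toList.drop q.toNat))).map (fun q => q - j + 1)) rep2 ?_]
    · rw [PySem.List.foldl_append_eq_flatMap]
    · intro j hj acc
      rcases PySem.List.mem_pyRange_one.mp hj with ⟨hj1, hj2⟩
      have hni : 1 ≤ nn - i := by omega
      have hkval : ((j - 1).toNat : Int) = j - 1 := by omega
      -- resolve l[j] = subs[j-1]
      have hsub : PySem.List.pyGetD ((PySem.List.pyRange 0 (nn - i)).map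
            (fun j => PySem.Str.slice txt (some j) (some (j + i)))) (j - 1) ""
          = PySem.Str.slice txt (some (j - 1)) (some ((j - 1) + i)) := by
        rw [show nn - i = (((nn - i).toNat : Nat) : Int) by omega, ← hkval,
          PySem.List.pyGetD_map_pyRange _ _ _ _ (by omega)]
      rw [hsub]
      -- the substring really has length i
      have hslen : ((PySem.Str.slice txt (some (j - 1)) (some ((j - 1) + i))).toList.length : Int)
          = i := by
        rw [PySem.Str.toList_slice, PySem.Chars.slice_eq_listSlice,
          PySem.List.slice_toNat txt.toList (by omega) (by omega)]
        simp only [List.length_take, List.length_drop]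
        omega
      rw [pv_findLoopA_eq txt _ j L (by rw [hslen]; omega) _ j acc (by omega) (by omega) le_rfl]
      have hLr : L = nn - i + 1 := by omega
      rw [hLr]
  rw [hA]
  -- B side: canonical form
  have hB : (PySem.List.pyRange 0 (nn - i)).foldl (fun rep2 p =>
        ((((PySem.List.pyRange 0 (max (nn - i + 1) 0)).foldl
            (fun occ p => occ.modify (PySem.Str.slice txt (some p) (some (p + i))) [] (· ++ [p]))
            PySem.Dict.empty)).getD (PySem.Str.slice txt (some p) (some (p + i))) []).foldl
          (fun rep2 q => if q > p then rep2 ++ [q - p] else rep2) rep2) rep2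
      = rep2 ++ (PySem.List.pyRange 0 (nn - i)).flatMap (fun p =>
          (((PySem.List.pyRange 0 (max (nn - i + 1) 0)).filter
            (fun q => PySem.Str.slice txt (some q) (some (q + i))
                == PySem.Str.slice txt (some p) (some (p + i)))).filter
            (fun q => decide (q > p))).map (fun q => q - p)) := by
    rw [PySem.List.foldl_congr_mem' _ _ (fun acc p =>
        acc ++ (((PySem.List.pyRange 0 (max (nn - i + 1) 0)).filter
          (fun q => PySem.Str.slice txt (some q) (some (q + i))
              == PySem.Str.slice txt (some p) (some (p + i)))).filter
          (fun q => decide (q > p))).map (fun q => q - p)) rep2 ?_]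
    · rw [PySem.List.foldl_append_eq_flatMap]
    · intro p hp acc
      rw [pv_occ_getD (fun p => PySem.Str.slice txt (some p) (some (p + i))) (max (nn - i + 1) 0)]
      rw [PySem.List.foldl_append_ite (fun q => q > p) (fun q => q - p)]
  rw [hB]
  -- the two flatMaps agree
  congr 1
  by_cases hni : nn - i ≤ 0
  · rw [show L = 1 by omega]
    rw [PySem.List.pyRange_one_eq_nil (le_refl 1), PySem.List.pyRange_one_eq_nil hni]
    simp
  · replace hni : 0 < nn - i := by omega
    have hLr : L - 1 = ((nn - i).toNat : Int) := by omega
    rw [PySem.List.pyRange_one 1 L, PySem.List.pyRange_one 0 (nn - i)]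
    rw [show (L - 1).toNat = (nn - i).toNat by omega, show nn - i - 0 = nn - i by ring]
    rw [List.flatMap_map, List.flatMap_map]
    refine List.flatMap_congr ?_
    intro k hk
    have hk' : (k : Int) < nn - i := by
      have := List.mem_range.mp hk
      omega
    have e1 : (1 : Int) + (k : Int) - 1 = (k : Int) := by ring
    have e2 : (0 : Int) + (k : Int) = (k : Int) := by ring
    rw [e2, e1]
    exact pv_g_eq txt i hi k hk'

-- the two rep2 lists coincide (as lists)
lemma pv_rep2_eq (txt : String) (mini maxi : Int)
    (hmini : ∀ i ∈ PySem.List.pyRange mini maxi, 0 ≤ i) :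
    (PySem.List.pyRange mini maxi).foldl (fun rep2 i =>
      let subs : List String :=
        (PySem.List.pyRange 0 (PySem.Str.len txt - i)).map
          (fun j => PySem.Str.slice txt (some j) (some (j + i)))
      let L : Int := (subs.length : Int) + 1
      (PySem.List.pyRange 1 L).foldl (fun rep2 j =>
        pvFindLoopA txt (PySem.List.pyGetD subs (j - 1) "") j L j rep2 (L - j).toNat) rep2) []
    = (PySem.List.pyRange mini maxi).foldl (fun rep2 i =>
      let occ : PySem.Dict String (List Int) :=
        (PySem.List.pyRange 0 (max (PySem.Str.len txt - i + 1) 0)).foldl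
          (fun occ p => occ.modify (PySem.Str.slice txt (some p) (some (p + i))) [] (· ++ [p]))
          PySem.Dict.empty
      (PySem.List.pyRange 0 (PySem.Str.len txt - i)).foldl (fun rep2 p =>
        (occ.getD (PySem.Str.slice txt (some p) (some (p + i))) []).foldl
          (fun rep2 q => if q > p then rep2 ++ [q - p] else rep2) rep2) rep2) [] := by
  refine PySem.List.foldl_congr_mem' _ _ _ [] ?_
  intro i hi acc
  exact pv_bodyI_eq txt i (hmini i hi) acc

-- the counter of distances counts divisibility exactly
lemma pv_count_eq (rep2 : List Int) (m : Int) :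
    ((((rep2.foldl (fun d x => d.insert x (d.getD x 0 + 1)) PySem.Dict.empty).items.filter
        (fun pr => PySem.Int.mod pr.1 m = 0)).map (fun pr => pr.2)).sum : Int)
    = ((rep2.countP (fun d => decide (PySem.Int.mod d m = 0)) : Nat) : Int) := by
  rw [PySem.Dict.foldl_insert_getD_add_one_eq_counter, PySem.Dict.items_counter]
  rw [List.filter_map, List.map_map]
  have hperm : ((PySem.Set.ofList rep2).filter
        (fun k => decide (PySem.Int.mod k m = 0))).Perm
      (rep2.dedup.filter (fun k => decide (PySem.Int.mod k m = 0))) := by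
    refine List.Perm.filter _ ?_
    refine (List.perm_ext_iff_of_nodup (PySem.Set.nodup_ofList rep2) rep2.nodup_dedup).mpr ?_
    intro a
    rw [PySem.Set.mem_ofList, List.mem_dedup]
  have hcomp : ((PySem.Set.ofList rep2).filter
        ((fun pr : Int × Int => decide (PySem.Int.mod pr.1 m = 0)) ∘
          (fun k => (k, (rep2.count k : Int))))).map
        ((fun pr : Int × Int => pr.2) ∘ (fun k => (k, (rep2.count k : Int))))
      = ((PySem.Set.ofList rep2).filter (fun k => decide (PySem.Int.mod k m = 0))).map
          (fun k => (rep2.count k : Int)) := rfl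
  rw [hcomp, (hperm.map _).sum_eq]
  have hcast : (List.map (fun k => ((rep2.count k : Nat) : Int))
      (rep2.dedup.filter (fun k => decide (PySem.Int.mod k m = 0)))).sum
      = ((((rep2.dedup.filter (fun k => decide (PySem.Int.mod k m = 0))).map
          (fun k => rep2.count k)).sum : Nat) : Int) := by
    rw [Nat.cast_list_sum, List.map_map]
    rfl
  rw [hcast, List.sum_map_count_dedup_filter_eq_countP]

-- ===== VERDICT (by name: the statement is the Claim_ definition above) =====
theorem repetitions_spec : Claim_equal_repetitions := by
  intro txt mini maxi la lb _hdom hpre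
  unfold Spec_repetitions repetitions repetitions_alt
  have hmini : ∀ i ∈ PySem.List.pyRange mini maxi, 0 ≤ i := by
    intro i hi
    rcases PySem.List.mem_pyRange_one.mp hi with ⟨h1, h2⟩
    rcases hpre.1 with h | h <;> omega
  rw [pv_rep2_eq txt mini maxi hmini]
  rw [PySem.List.foldl_append_singleton_eq_map]
  refine (List.map_congr_left ?_).symm
  intro m _hm
  rw [PySem.List.foldl_ite_add_one, pv_count_eq]
  simp
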